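-- pv_equiv track=rewrite | github.com/necrosato/AdventOfCode | 2021/day08/solution.py | getSegmentCounts
-- ===== SOURCE A (Python) =====
-- def getSegmentCounts(digits):
--     counts = {}
--     for char in 'abcdefg':
--         count = 0
--         for digit in digits:
--             if char in digit:
--                 count +=1
--         if count not in counts:
--             counts[count] = []
--         counts[count].append(char)
--     return counts
-- ===== SOURCE B (Python) =====
-- def getSegmentCounts(digits):
--     freq = {}
--     for digit in digits:
--         for ch in set(digit):
--             freq[ch] = freq.get(ch, 0) + 1
--     counts = {}
--     for ch in 'abcdefg':
--         counts.setdefault(freq.get(ch, 0), []).append(ch)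
--     return counts
-- ===== Notes on version B (the rewrite author's own statement) =====
-- stated objective: alternative
-- what changed: One pass over the digits builds a per-segment frequency table (counting each digit's unique chars once), then a single pass over 'abcdefg' groups chars by their looked-up count via setdefault, replacing A's seven full rescans of the digit list.
import Mathlib
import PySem

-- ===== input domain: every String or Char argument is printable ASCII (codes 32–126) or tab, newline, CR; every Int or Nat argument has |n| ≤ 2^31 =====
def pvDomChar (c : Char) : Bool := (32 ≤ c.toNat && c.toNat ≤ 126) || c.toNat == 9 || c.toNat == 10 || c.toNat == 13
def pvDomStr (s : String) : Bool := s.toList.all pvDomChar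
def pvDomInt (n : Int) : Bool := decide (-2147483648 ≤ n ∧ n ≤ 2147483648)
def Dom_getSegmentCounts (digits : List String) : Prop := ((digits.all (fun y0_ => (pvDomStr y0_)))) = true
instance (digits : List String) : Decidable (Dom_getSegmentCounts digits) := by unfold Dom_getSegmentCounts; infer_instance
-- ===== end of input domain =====

-- B builds a per-segment frequency table in one pass over the digits (counting each digit's
-- unique chars once) and then groups 'abcdefg' by table lookup, instead of A's per-char rescans
-- of the digit list (a different decomposition; not measured faster).

-- ===== PORT A =====
def getSegmentCounts (digits : List String) : List (Int × List String) :=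
  ("abcdefg".toList.foldl (fun counts char =>
    let count : Int :=
      digits.foldl (fun count digit =>
        if PySem.Str.isIn (String.ofList [char]) digit then count + 1 else count) 0
    let counts := if counts.contains count then counts else counts.insert count ([] : List String)
    counts.modify count [] (fun l => l ++ [String.ofList [char]]))
    (PySem.Dict.empty : PySem.Dict Int (List String))).items

-- ===== PORT B =====
def getSegmentCounts_alt (digits : List String) : List (Int × List String) :=
  let freq : PySem.Dict Char Int :=
    digits.foldl (fun d digit =>
      (PySem.Set.ofList digit.toList).foldl (fun d c => d.insert c (d.getD c 0 + 1)) d)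
      PySem.Dict.empty
  ("abcdefg".toList.foldl (fun counts ch =>
    (counts.setdefault (freq.getD ch 0) ([] : List String)).modify (freq.getD ch 0) []
      (fun l => l ++ [String.ofList [ch]]))
    (PySem.Dict.empty : PySem.Dict Int (List String))).items

-- ===== PRECONDITION & SPEC =====
def Spec_getSegmentCounts (digits : List String) (out : List (Int × List String)) : Prop := out = getSegmentCounts_alt digits
instance (digits : List String) (out : List (Int × List String)) : Decidable (Spec_getSegmentCounts digits out) := by unfold Spec_getSegmentCounts; infer_instance

-- ===== CLAIM (what is proved, stated in full; the proofs are below) =====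
def Claim_equal_getSegmentCounts : Prop := ∀ (digits : List String), Dom_getSegmentCounts digits → Spec_getSegmentCounts digits (getSegmentCounts digits)

-- ===== LEMMAS AND PROOFS =====

-- Python's `c in digit` for a 1-char string c is membership of the char.
lemma isIn_singleton (c : Char) (s : String) :
    PySem.Str.isIn (String.ofList [c]) s = s.toList.contains c := by
  have key : PySem.Chars.isIn [c] s.toList = true ↔ c ∈ s.toList := by
    rw [PySem.Chars.isIn_iff_infix]
    constructor
    · intro hinf; exact hinf.subset (by simp)
    · intro h
      obtain ⟨a, b, hab⟩ := List.append_of_mem h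
      exact ⟨a, b, by rw [hab]; simp⟩
  simp only [PySem.Str.isIn_eq, String.toList_ofList]
  by_cases h : c ∈ s.toList
  · simp [key.mpr h, h]
  · have h2 : s.toList.contains c = false := by simp [h]
    rw [h2]
    exact Bool.eq_false_iff.mpr (fun hb => h (key.mp hb))

-- B's frequency table holds, for every char, the number of digits containing it.
lemma freq_getD (digits : List String) (d : PySem.Dict Char Int) (c : Char) :
    (digits.foldl (fun d digit =>
      (PySem.Set.ofList digit.toList).foldl (fun d c => d.insert c (d.getD c 0 + 1)) d) d).getD c 0
    = d.getD c 0 + (digits.countP (fun s => s.toList.contains c) : Int) := by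
  induction digits generalizing d with
  | nil => simp
  | cons s rest ih =>
    rw [List.foldl_cons, ih, PySem.Dict.getD_foldl_insert_add_one]
    have hc : ((PySem.Set.ofList s.toList).count c : Int) = if s.toList.contains c then 1 else 0 := by
      by_cases hm : c ∈ s.toList
      · have : c ∈ PySem.Set.ofList s.toList := (PySem.Set.mem_ofList _ _).mpr hm
        rw [List.count_eq_one_of_mem (PySem.Set.nodup_ofList _) this]
        simp [hm]
      · have : c ∉ PySem.Set.ofList s.toList := fun h => hm ((PySem.Set.mem_ofList _ _).mp h)
        rw [List.count_eq_zero_of_not_mem this]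
        simp [hm]
    rw [List.countP_cons]
    by_cases hm : s.toList.contains c <;> simp [hm] at hc ⊢ <;> rw [hc] <;> ring

-- A's inner rescan of the digits computes the same count.
lemma countA_eq (digits : List String) (c : Char) :
    digits.foldl (fun count digit =>
      if PySem.Str.isIn (String.ofList [c]) digit then count + 1 else count) (0 : Int)
    = (digits.countP (fun s => s.toList.contains c) : Int) := by
  have : ∀ (init : Int), digits.foldl (fun count digit =>
      if PySem.Str.isIn (String.ofList [c]) digit then count + 1 else count) init
      = init + (digits.countP (fun s => s.toList.contains c) : Int) := by
    induction digits with
    | nil => simp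
    | cons s rest ih =>
      intro init
      rw [List.foldl_cons, ih, List.countP_cons, isIn_singleton]
      by_cases hm : c ∈ s.toList <;> simp [hm] <;> ring
  simpa using this 0

-- ===== VERDICT (by name: the statement is the Claim_ definition above) =====
theorem getSegmentCounts_spec : Claim_equal_getSegmentCounts := by
  intro digits _
  unfold Spec_getSegmentCounts getSegmentCounts getSegmentCounts_alt
  have hstep : ∀ (counts : PySem.Dict Int (List String)) (ch : Char),
      (let count : Int :=
        digits.foldl (fun count digit =>
          if PySem.Str.isIn (String.ofList [ch]) digit then count + 1 else count) 0
      let counts' := if counts.contains count then counts else counts.insert count ([] : List String)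
      counts'.modify count [] (fun l => l ++ [String.ofList [ch]]))
      =
      ((counts.setdefault
          ((digits.foldl (fun d digit =>
            (PySem.Set.ofList digit.toList).foldl (fun d c => d.insert c (d.getD c 0 + 1)) d)
            PySem.Dict.empty).getD ch 0) ([] : List String)).modify
        ((digits.foldl (fun d digit =>
            (PySem.Set.ofList digit.toList).foldl (fun d c => d.insert c (d.getD c 0 + 1)) d)
            PySem.Dict.empty).getD ch 0) []
        (fun l => l ++ [String.ofList [ch]])) := by
    intro counts ch
    rw [freq_getD, countA_eq]
    simp only [PySem.Dict.getD_empty, zero_add]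
    by_cases hc : counts.contains ((digits.countP (fun s => s.toList.contains ch) : Int)) = true
    · rw [if_pos hc, PySem.Dict.setdefault_of_contains counts _ hc]
    · rw [if_neg hc, PySem.Dict.setdefault_of_not_contains counts _ (by simpa using hc)]
  exact congrArg PySem.Dict.items (PySem.List.foldl_congr_mem _ _ _ _ (fun acc x hx => hstep acc x))
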